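-- pv_equiv track=rewrite | github.com/weitingyen9487/DSC40B_SP26_STARTERCODE | hw3/swap_sum.py | swap_sum
-- ===== SOURCE A (Python) =====
-- def swap_sum(A, B):
--     """Swaps two elements in two sorted arrays to obtain a target sum
--     difference of 10.
--
--     Assumes that both arrays are sorted in ascending order and only
--     contain integers.
--
--     """
--     sumA = sum(A)
--     sumB = sum(B)
--
--     diff = sumA + 10 - sumB
--
--     # must be even to divide by 2
--     if diff % 2 != 0:
--         return None
--
--     target = diff // 2  # we want a - b = target
--
--     i = 0
--     j = 0
--
--     while i < len(A) and j < len(B):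
--         current = A[i] - B[j]
--
--         if current == target:
--             return (i, j)
--         elif current < target:
--             i += 1
--         else:
--             j += 1
--
--     return None
-- ===== SOURCE B (Python) =====
-- def swap_sum(A, B):
--     """Swaps two elements in two sorted arrays to obtain a target sum
--     difference of 10.
--
--     Same guard and target as the original; instead of two index
--     pointers, consumes reversed working copies of the arrays as stacks
--     and recovers the index pair from the remaining stack lengths.
--     """
--     diff = sum(A) + 10 - sum(B)
--     if diff % 2 != 0:
--         return None
--     target = diff // 2  # we want a - b = target
--     xs = A[::-1]
--     ys = B[::-1]
--     while xs and ys: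
--         current = xs[-1] - ys[-1]
--         if current == target:
--             return (len(A) - len(xs), len(B) - len(ys))
--         elif current < target:
--             xs.pop()
--         else:
--             ys.pop()
--     return None
-- ===== Notes on version B (the rewrite author's own statement) =====
-- stated objective: alternative
-- what changed: Replaced the two index pointers walking forward over the arrays by reversed working copies consumed as stacks (pop from the top), with the returned index pair recovered from len(A)/len(B) minus the remaining stack lengths; equivalence is total.
import Mathlib
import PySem

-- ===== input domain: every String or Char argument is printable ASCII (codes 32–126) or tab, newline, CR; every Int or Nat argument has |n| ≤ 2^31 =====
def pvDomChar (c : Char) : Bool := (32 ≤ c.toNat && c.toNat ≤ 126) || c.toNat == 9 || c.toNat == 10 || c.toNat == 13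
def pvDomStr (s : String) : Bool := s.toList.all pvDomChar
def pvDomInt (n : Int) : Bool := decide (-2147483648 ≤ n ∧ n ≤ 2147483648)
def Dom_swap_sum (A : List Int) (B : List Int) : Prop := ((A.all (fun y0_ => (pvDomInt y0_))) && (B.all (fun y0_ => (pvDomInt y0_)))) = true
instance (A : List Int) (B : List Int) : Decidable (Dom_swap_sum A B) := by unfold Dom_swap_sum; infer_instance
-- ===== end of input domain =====

-- B replaces A's two index pointers by consuming reversed working copies of the arrays as
-- stacks, recovering the index pair from the remaining stack lengths (alternative
-- decomposition, same cost); equivalence is total.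

-- ===== PORT A =====
-- the while loop: state (i, j); the guard guarantees i < len(A) and j < len(B),
-- so Python's A[i] / B[j] are exactly A.getD i 0 / B.getD j 0 here (in-range access).
def swapLoop (A B : List Int) (target : Int) (i j : Nat) : Option (Int × Int) :=
  if h : i < A.length ∧ j < B.length then
    let current := A.getD i 0 - B.getD j 0
    if current = target then some ((i : Int), (j : Int))
    else if current < target then swapLoop A B target (i + 1) j
    else swapLoop A B target i (j + 1)
  else none
termination_by (A.length - i) + (B.length - j)
decreasing_by all_goals omega

def swap_sum (A : List Int) (B : List Int) : Option (Int × Int) :=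
  let sumA := A.sum
  let sumB := B.sum
  let diff := sumA + 10 - sumB
  if PySem.Int.mod diff 2 ≠ 0 then none
  else
    let target := PySem.Int.floordiv diff 2
    swapLoop A B target 0 0

-- ===== PORT B =====
-- the while loop over the two stacks xs, ys; n = len(A), m = len(B) are fixed outside;
-- xs[-1] / ys[-1] on the nonempty stacks is PySem.List.pyGetD _ (-1) 0,
-- xs.pop() removes the last element (dropLast).
def altGo (n m : Nat) (t : Int) (xs ys : List Int) : Option (Int × Int) :=
  if h : xs ≠ [] ∧ ys ≠ [] then
    let current := PySem.List.pyGetD xs (-1) 0 - PySem.List.pyGetD ys (-1) 0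
    if current = t then some (((n - xs.length : Nat) : Int), ((m - ys.length : Nat) : Int))
    else if current < t then altGo n m t xs.dropLast ys
    else altGo n m t xs ys.dropLast
  else none
termination_by xs.length + ys.length
decreasing_by
  · have := List.length_pos_of_ne_nil h.1
    simp [List.length_dropLast]; omega
  · have := List.length_pos_of_ne_nil h.2
    simp [List.length_dropLast]; omega

def swap_sum_alt (A : List Int) (B : List Int) : Option (Int × Int) :=
  let diff := A.sum + 10 - B.sum
  if PySem.Int.mod diff 2 ≠ 0 then none
  else
    let target := PySem.Int.floordiv diff 2
    -- A[::-1] is A.reverse (PySem.List.slice?_none_none_neg_one)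
    altGo A.length B.length target A.reverse B.reverse

-- ===== PRECONDITION & SPEC =====
-- A is total (no Pre_): the equivalence holds on every input.
def Spec_swap_sum (A : List Int) (B : List Int) (out : Option (Int × Int)) : Prop :=
  out = swap_sum_alt A B
instance (A : List Int) (B : List Int) (out : Option (Int × Int)) :
    Decidable (Spec_swap_sum A B out) := by unfold Spec_swap_sum; infer_instance

-- ===== CLAIM (what is proved, stated in full; the proofs are below) =====
def Claim_equal_swap_sum : Prop := ∀ (A : List Int) (B : List Int),
  Dom_swap_sum A B → Spec_swap_sum A B (swap_sum A B)

-- ===== LEMMAS AND PROOFS =====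

-- the stack xs is always the reversed i-th suffix of A (and ys of B); the top of the
-- stack is A[i], popping it reverses the (i+1)-th suffix, and len(A) - len(xs) = i.
lemma loop_eq (A B : List Int) (t : Int) (i j : Nat) :
    swapLoop A B t i j = altGo A.length B.length t (A.drop i).reverse (B.drop j).reverse := by
  rw [swapLoop, altGo]
  by_cases h : i < A.length ∧ j < B.length
  · have hx : (A.drop i).reverse ≠ [] := by
      simp [List.drop_eq_nil_iff]; omega
    have hy : (B.drop j).reverse ≠ [] := by
      simp [List.drop_eq_nil_iff]; omega
    rw [dif_pos h, dif_pos ⟨hx, hy⟩]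
    have hgx : PySem.List.pyGetD (A.drop i).reverse (-1) 0 = A.getD i 0 := by
      rw [PySem.List.pyGetD_neg_one _ _ hx, List.getLast_reverse,
        List.head_drop, List.getD_eq_getElem A 0 h.1]
    have hgy : PySem.List.pyGetD (B.drop j).reverse (-1) 0 = B.getD j 0 := by
      rw [PySem.List.pyGetD_neg_one _ _ hy, List.getLast_reverse,
        List.head_drop, List.getD_eq_getElem B 0 h.2]
    simp only [hgx, hgy]
    by_cases hc : A.getD i 0 - B.getD j 0 = t
    · rw [if_pos hc, if_pos hc]
      have hi : ((A.length - (A.drop i).reverse.length : Nat) : Int) = (i : Int) := by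
        simp [List.length_reverse, List.length_drop]
        omega
      have hj : ((B.length - (B.drop j).reverse.length : Nat) : Int) = (j : Int) := by
        simp [List.length_reverse, List.length_drop]
        omega
      rw [hi, hj]
    · rw [if_neg hc, if_neg hc]
      by_cases hlt : A.getD i 0 - B.getD j 0 < t
      · rw [if_pos hlt, if_pos hlt, List.dropLast_reverse, List.tail_drop]
        exact loop_eq A B t (i + 1) j
      · rw [if_neg hlt, if_neg hlt, List.dropLast_reverse, List.tail_drop]
        exact loop_eq A B t i (j + 1)
  · have hne : ¬((A.drop i).reverse ≠ [] ∧ (B.drop j).reverse ≠ []) := by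
      simp only [List.reverse_eq_nil_iff, List.drop_eq_nil_iff, ne_eq, not_and, not_not]
      omega
    rw [dif_neg h, dif_neg hne]
termination_by (A.length - i) + (B.length - j)
decreasing_by all_goals omega

-- ===== VERDICT (by name: the statement is the Claim_ definition above) =====
theorem swap_sum_spec : Claim_equal_swap_sum := by
  intro A B _
  unfold Spec_swap_sum swap_sum swap_sum_alt
  simp only []
  by_cases hd : PySem.Int.mod (A.sum + 10 - B.sum) 2 ≠ 0
  · rw [if_pos hd, if_pos hd]
  · rw [if_neg hd, if_neg hd]
    have := loop_eq A B (PySem.Int.floordiv (A.sum + 10 - B.sum) 2) 0 0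
    simpa using this
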